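-- pv_equiv track=rewrite | github.com/githubajaydhage/autoapply-resume-automation | scripts/enhanced_job_application_system.py | _get_achievement
-- ===== SOURCE A (Python) =====
-- from typing import Dict, List, Optional, Tuple
--
-- def _get_achievement(skills: List[str], job_title: str) -> str:
--     """Generate a relevant achievement based on skills"""
--     if any(s.lower() in ['sql', 'data analysis', 'power bi', 'tableau'] for s in skills):
--         return "In my previous role, I developed automated reporting dashboards that reduced manual reporting time by 60% and improved decision-making speed for stakeholders."
--     elif any(s.lower() in ['autocad', 'interior design', '3ds max', 'sketchup'] for s in skills):
--         return "I recently completed a 50,000 sq ft commercial interior project, managing design, estimation, and vendor coordination from concept to completion."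
--     elif any(s.lower() in ['python', 'java', 'javascript', 'react'] for s in skills):
--         return "I architected and delivered a high-performance application that handles 10,000+ daily users with 99.9% uptime."
--     else:
--         return "I have consistently exceeded performance targets and received recognition for my contributions to team projects."
-- ===== SOURCE B (Python) =====
-- _KEYWORD_GROUPS = (
--     ('sql', 'data analysis', 'power bi', 'tableau'),
--     ('autocad', 'interior design', '3ds max', 'sketchup'),
--     ('python', 'java', 'javascript', 'react'),
-- )
--
-- _ACHIEVEMENTS = (
--     "In my previous role, I developed automated reporting dashboards that reduced manual reporting time by 60% and improved decision-making speed for stakeholders.",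
--     "I recently completed a 50,000 sq ft commercial interior project, managing design, estimation, and vendor coordination from concept to completion.",
--     "I architected and delivered a high-performance application that handles 10,000+ daily users with 99.9% uptime.",
--     "I have consistently exceeded performance targets and received recognition for my contributions to team projects.",
-- )
--
--
-- def _category(skill):
--     """Priority index (0 best) of the skill's category; 3 = uncategorised."""
--     s = skill.lower()
--     for i, group in enumerate(_KEYWORD_GROUPS):
--         if s in group:
--             return i
--     return 3
--
--
-- def _get_achievement(skills, job_title):
--     """Single pass over the skills, tracking the best (lowest) category priority seen."""
--     best = 3
--     for skill in skills:
--         best = min(best, _category(skill))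
--     return _ACHIEVEMENTS[best]
-- ===== Notes on version B (the rewrite author's own statement) =====
-- stated objective: alternative
-- what changed: Inverted the traversal: instead of A's category-major if/elif cascade where each branch rescans and re-lowercases all skills, B makes one skill-major pass that maps each skill to a numeric category priority and folds with min, then indexes the achievement table by the best priority.
import Mathlib
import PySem

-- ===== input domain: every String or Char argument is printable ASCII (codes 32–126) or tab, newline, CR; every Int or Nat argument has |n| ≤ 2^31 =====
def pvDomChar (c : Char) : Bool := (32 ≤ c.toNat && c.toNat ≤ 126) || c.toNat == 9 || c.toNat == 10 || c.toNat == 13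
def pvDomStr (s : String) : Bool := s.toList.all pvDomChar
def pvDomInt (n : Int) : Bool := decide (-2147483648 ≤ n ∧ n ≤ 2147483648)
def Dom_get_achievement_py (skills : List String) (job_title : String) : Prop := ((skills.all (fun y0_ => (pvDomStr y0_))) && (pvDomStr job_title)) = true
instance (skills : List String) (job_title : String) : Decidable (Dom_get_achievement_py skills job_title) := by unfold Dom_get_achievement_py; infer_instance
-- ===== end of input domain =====

-- B inverts A's traversal: one skill-major pass taking the min category priority per skill, then a table index; return values identical.


-- ===== PORT A =====
def get_achievement_py (skills : List String) (job_title : String) : String :=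
  if skills.any (fun s => (["sql", "data analysis", "power bi", "tableau"] : List String).contains (PySem.Str.lower s)) then
    "In my previous role, I developed automated reporting dashboards that reduced manual reporting time by 60% and improved decision-making speed for stakeholders."
  else if skills.any (fun s => (["autocad", "interior design", "3ds max", "sketchup"] : List String).contains (PySem.Str.lower s)) then
    "I recently completed a 50,000 sq ft commercial interior project, managing design, estimation, and vendor coordination from concept to completion."
  else if skills.any (fun s => (["python", "java", "javascript", "react"] : List String).contains (PySem.Str.lower s)) then
    "I architected and delivered a high-performance application that handles 10,000+ daily users with 99.9% uptime."
  else
    "I have consistently exceeded performance targets and received recognition for my contributions to team projects."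

-- ===== PORT B =====
def keywordGroups : List (List String) :=
  [ ["sql", "data analysis", "power bi", "tableau"],
    ["autocad", "interior design", "3ds max", "sketchup"],
    ["python", "java", "javascript", "react"] ]

def achievements : List String :=
  [ "In my previous role, I developed automated reporting dashboards that reduced manual reporting time by 60% and improved decision-making speed for stakeholders.",
    "I recently completed a 50,000 sq ft commercial interior project, managing design, estimation, and vendor coordination from concept to completion.",
    "I architected and delivered a high-performance application that handles 10,000+ daily users with 99.9% uptime.",
    "I have consistently exceeded performance targets and received recognition for my contributions to team projects." ]

-- Source B's `for i, group in enumerate(...)` loop inside _category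
def categoryAux (s : String) : Nat → List (List String) → Nat
  | _, [] => 3
  | i, group :: rest => if group.contains s then i else categoryAux s (i + 1) rest

def category (skill : String) : Nat :=
  categoryAux (PySem.Str.lower skill) 0 keywordGroups

def get_achievement_py_alt (skills : List String) (job_title : String) : String :=
  -- the index `best` is always ≤ 3, so the `[best]` indexing in Source B never fails; getD "" is exact here
  achievements.getD (skills.foldl (fun best skill => min best (category skill)) 3) ""

-- ===== PRECONDITION & SPEC =====
def Spec_get_achievement_py (skills : List String) (job_title : String) (out : String) : Prop := out = get_achievement_py_alt skills job_title
instance (skills : List String) (job_title : String) (out : String) : Decidable (Spec_get_achievement_py skills job_title out) := by unfold Spec_get_achievement_py; infer_instance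

-- ===== CLAIM (what is proved, stated in full; the proofs are below) =====
def Claim_equal_get_achievement_py : Prop := ∀ (skills : List String) (job_title : String), Dom_get_achievement_py skills job_title → Spec_get_achievement_py skills job_title (get_achievement_py skills job_title)

-- ===== LEMMAS AND PROOFS =====

-- the category of one skill, written as a branch cascade over the literal groups
theorem category_eq (s : String) :
    category s =
      if (["sql", "data analysis", "power bi", "tableau"] : List String).contains (PySem.Str.lower s) then 0
      else if (["autocad", "interior design", "3ds max", "sketchup"] : List String).contains (PySem.Str.lower s) then 1
      else if (["python", "java", "javascript", "react"] : List String).contains (PySem.Str.lower s) then 2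
      else 3 := by
  simp [category, keywordGroups, categoryAux]

-- pulling the accumulator out of the min-fold (for accumulators ≤ 3)
theorem foldl_min_acc (l : List String) (b : Nat) (hb : b ≤ 3) :
    l.foldl (fun best skill => min best (category skill)) b
      = min b (l.foldl (fun best skill => min best (category skill)) 3) := by
  induction l generalizing b with
  | nil => simp [List.foldl]; omega
  | cons s t ih =>
    have hc : category s ≤ 3 := by rw [category_eq]; split_ifs <;> omega
    simp only [List.foldl]
    rw [ih (min b (category s)) (by omega), ih (min 3 (category s)) (by omega)]
    have : min 3 (category s) = category s := by omega
    rw [this]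
    omega

-- the min-fold computes A's branch index
theorem fold_eq_cascade (skills : List String) :
    skills.foldl (fun best skill => min best (category skill)) 3
      = (if skills.any (fun s => (["sql", "data analysis", "power bi", "tableau"] : List String).contains (PySem.Str.lower s)) then 0
         else if skills.any (fun s => (["autocad", "interior design", "3ds max", "sketchup"] : List String).contains (PySem.Str.lower s)) then 1
         else if skills.any (fun s => (["python", "java", "javascript", "react"] : List String).contains (PySem.Str.lower s)) then 2
         else 3) := by
  induction skills with
  | nil => simp
  | cons s t ih =>
    simp only [List.foldl, List.any_cons]
    rw [foldl_min_acc t (min 3 (category s)) (by omega), ih, category_eq]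
    rcases Bool.eq_false_or_eq_true ((["sql", "data analysis", "power bi", "tableau"] : List String).contains (PySem.Str.lower s)) with h0 | h0 <;>
    rcases Bool.eq_false_or_eq_true ((["autocad", "interior design", "3ds max", "sketchup"] : List String).contains (PySem.Str.lower s)) with h1 | h1 <;>
    rcases Bool.eq_false_or_eq_true ((["python", "java", "javascript", "react"] : List String).contains (PySem.Str.lower s)) with h2 | h2 <;>
    rcases Bool.eq_false_or_eq_true (t.any (fun s => (["sql", "data analysis", "power bi", "tableau"] : List String).contains (PySem.Str.lower s))) with ha0 | ha0 <;>
    rcases Bool.eq_false_or_eq_true (t.any (fun s => (["autocad", "interior design", "3ds max", "sketchup"] : List String).contains (PySem.Str.lower s))) with ha1 | ha1 <;>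
    rcases Bool.eq_false_or_eq_true (t.any (fun s => (["python", "java", "javascript", "react"] : List String).contains (PySem.Str.lower s))) with ha2 | ha2 <;>
    simp only [h0, h1, h2, ha0, ha1, ha2] <;> norm_num

-- ===== VERDICT (by name: the statement is the Claim_ definition above) =====
theorem get_achievement_py_spec : Claim_equal_get_achievement_py := by
  intro skills job_title _
  unfold Spec_get_achievement_py get_achievement_py get_achievement_py_alt
  rw [fold_eq_cascade]
  split_ifs <;> rfl
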